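-- pv_equiv track=rewrite | github.com/GooseBag/GooseBag | main.py | is_spin_win
-- ===== SOURCE A (Python) =====
-- def is_spin_win(reel_giant, cols):
--     reel_one = []
--     reel_two = []
--     reel_three = []
--     win = 0
--     bonus = 0
--     for i in range(len(reel_giant)):
--         if i % cols == 0:
--             reel_one.append(reel_giant[i])
--         elif i % cols == 1:
--             reel_two.append(reel_giant[i])
--         else:
--             reel_three.append(reel_giant[i])
--     for i in reel_one:
--         for j in reel_two:
--             for k in reel_three:
--                 if i == j == k:
--                     win += i
--                     if i == 4:
--                         bonus += 1
--     return win, bonus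
-- ===== SOURCE B (Python) =====
-- def _tally(values):
--     counts = {}
--     for v in values:
--         counts[v] = counts.get(v, 0) + 1
--     return counts
--
-- def is_spin_win(reel_giant, cols):
--     cells = list(enumerate(reel_giant))
--     one = _tally(v for i, v in cells if i % cols == 0)
--     two = _tally(v for i, v in cells if i % cols == 1)
--     three = _tally(v for i, v in cells if i % cols != 0 and i % cols != 1)
--     win = sum(v * c * two.get(v, 0) * three.get(v, 0) for v, c in one.items())
--     bonus = one.get(4, 0) * two.get(4, 0) * three.get(4, 0)
--     return win, bonus
-- ===== Notes on version B (the rewrite author's own statement) =====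
-- stated objective: alternative
-- what changed: Replaces A's dispatch loop plus triple nested loop by filtered column lists, per-value occurrence tallies of each column, a single pass over column one's tally summing v*c1*c2(v)*c3(v), and the bonus computed as the closed product of the three counts of 4.
import Mathlib
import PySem

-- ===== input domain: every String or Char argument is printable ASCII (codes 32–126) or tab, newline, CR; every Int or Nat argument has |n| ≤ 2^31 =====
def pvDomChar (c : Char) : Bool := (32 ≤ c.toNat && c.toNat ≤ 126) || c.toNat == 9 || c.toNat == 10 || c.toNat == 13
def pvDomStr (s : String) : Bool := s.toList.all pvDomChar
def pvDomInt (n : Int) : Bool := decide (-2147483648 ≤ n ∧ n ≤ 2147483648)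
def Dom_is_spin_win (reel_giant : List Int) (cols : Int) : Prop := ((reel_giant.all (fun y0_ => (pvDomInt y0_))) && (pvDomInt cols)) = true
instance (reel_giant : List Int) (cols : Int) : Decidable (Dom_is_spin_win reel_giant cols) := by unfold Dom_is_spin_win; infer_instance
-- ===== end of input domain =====

-- B replaces A's triple nested loop by per-column occurrence tallies (built from filtered
-- columns) and one pass over the tally of column one; bonus is the closed product of counts of 4.


-- ===== PORT A =====
-- 'for i in range(len(reel_giant)): … reel_giant[i]' iterates all in-range indices with their
-- elements, ported exactly via PySem.List.enumerate.
def is_spin_win (reel_giant : List Int) (cols : Int) : Int × Int :=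
  let s := (PySem.List.enumerate reel_giant 0).foldl
    (fun (s : List Int × List Int × List Int) p =>
      if PySem.Int.mod p.1 cols = 0 then (s.1 ++ [p.2], s.2.1, s.2.2)
      else if PySem.Int.mod p.1 cols = 1 then (s.1, s.2.1 ++ [p.2], s.2.2)
      else (s.1, s.2.1, s.2.2 ++ [p.2])) ([], [], [])
  s.1.foldl (fun wb i =>
    s.2.1.foldl (fun wb j =>
      s.2.2.foldl (fun wb k =>
        if i = j ∧ j = k then (wb.1 + i, if i = 4 then wb.2 + 1 else wb.2)
        else wb) wb) wb) (0, 0)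

-- ===== PORT B =====
-- helper _tally of Source B: an occurrence counter built with dict.get
def pvTally (values : List Int) : PySem.Dict Int Int :=
  values.foldl (fun counts v => counts.insert v (counts.getD v 0 + 1)) PySem.Dict.empty

def is_spin_win_alt (reel_giant : List Int) (cols : Int) : Int × Int :=
  let cells := PySem.List.enumerate reel_giant 0
  let one := pvTally ((cells.filter (fun p => PySem.Int.mod p.1 cols == 0)).map (·.2))
  let two := pvTally ((cells.filter (fun p => PySem.Int.mod p.1 cols == 1)).map (·.2))
  let three := pvTally ((cells.filter (fun p =>
    PySem.Int.mod p.1 cols != 0 && PySem.Int.mod p.1 cols != 1)).map (·.2))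
  let win := one.items.foldl
    (fun acc p => acc + p.1 * p.2 * two.getD p.1 0 * three.getD p.1 0) 0
  let bonus := one.getD 4 0 * two.getD 4 0 * three.getD 4 0
  (win, bonus)

-- ===== PRECONDITION & SPEC =====
-- Both Pythons raise ZeroDivisionError on 'i % cols' when cols == 0 and the list is non-empty.
def Pre_is_spin_win (reel_giant : List Int) (cols : Int) : Prop := cols ≠ 0 ∨ reel_giant = []
instance (reel_giant : List Int) (cols : Int) : Decidable (Pre_is_spin_win reel_giant cols) := by unfold Pre_is_spin_win; infer_instance
def pvWitness_is_spin_win : List Int × Int := ([4, 4, 4, 1, 2, 3], 3)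
def Spec_is_spin_win (reel_giant : List Int) (cols : Int) (out : Int × Int) : Prop := out = is_spin_win_alt reel_giant cols
instance (reel_giant : List Int) (cols : Int) (out : Int × Int) : Decidable (Spec_is_spin_win reel_giant cols out) := by unfold Spec_is_spin_win; infer_instance

-- ===== CLAIM (what is proved, stated in full; the proofs are below) =====
def Claim_equal_is_spin_win : Prop := ∀ (reel_giant : List Int) (cols : Int), Dom_is_spin_win reel_giant cols → Pre_is_spin_win reel_giant cols → Spec_is_spin_win reel_giant cols (is_spin_win reel_giant cols)

-- ===== LEMMAS AND PROOFS =====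

-- Phase 1: A's single dispatch loop produces exactly the three filtered columns of B.
theorem pv_split (cols : Int) (ps : List (Int × Int)) : ∀ (acc : List Int × List Int × List Int),
    ps.foldl
      (fun (s : List Int × List Int × List Int) p =>
        if PySem.Int.mod p.1 cols = 0 then (s.1 ++ [p.2], s.2.1, s.2.2)
        else if PySem.Int.mod p.1 cols = 1 then (s.1, s.2.1 ++ [p.2], s.2.2)
        else (s.1, s.2.1, s.2.2 ++ [p.2])) acc
    = (acc.1 ++ (ps.filter (fun p => PySem.Int.mod p.1 cols == 0)).map (·.2),
       acc.2.1 ++ (ps.filter (fun p => PySem.Int.mod p.1 cols == 1)).map (·.2),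
       acc.2.2 ++ (ps.filter (fun p =>
         PySem.Int.mod p.1 cols != 0 && PySem.Int.mod p.1 cols != 1)).map (·.2)) := by
  induction ps with
  | nil => intro acc; simp
  | cons p ps ih =>
    intro acc
    simp only [List.foldl_cons, List.filter_cons]
    by_cases h0 : PySem.Int.mod p.1 cols = 0
    · simp [h0, ih, List.append_assoc]
    · by_cases h1 : PySem.Int.mod p.1 cols = 1
      · simp [h1, ih, List.append_assoc]
      · simp [h0, h1, ih, List.append_assoc]

-- Phase 2, innermost loop of A collapsed to a count.
theorem pv_inner (i j : Int) (r3 : List Int) : ∀ (wb : Int × Int),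
    r3.foldl (fun wb k =>
        if i = j ∧ j = k then (wb.1 + i, if i = 4 then wb.2 + 1 else wb.2)
        else wb) wb
    = if i = j then (wb.1 + i * (r3.count i : Int),
        if i = 4 then wb.2 + (r3.count i : Int) else wb.2) else wb := by
  induction r3 with
  | nil => intro wb; split_ifs <;> simp
  | cons k r3 ih =>
    intro wb
    simp only [List.foldl_cons, ih]
    by_cases hij : i = j
    · subst hij
      by_cases hk : i = k
      · subst hk
        rw [List.count_cons_self]
        by_cases h4 : i = 4 <;> simp [h4, Prod.ext_iff] <;> (try constructor) <;> ring
      · have : ¬ (i = i ∧ i = k) := fun h => hk h.2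
        rw [if_neg this, if_pos rfl, if_pos rfl,
          List.count_cons_of_ne (by simpa using Ne.symm hk)]
    · have : ¬ (i = j ∧ j = k) := fun h => hij h.1
      rw [if_neg this, if_neg hij, if_neg hij]

-- Phase 2, middle loop of A collapsed.
theorem pv_mid (i : Int) (r2 r3 : List Int) : ∀ (wb : Int × Int),
    r2.foldl (fun wb j =>
      r3.foldl (fun wb k =>
        if i = j ∧ j = k then (wb.1 + i, if i = 4 then wb.2 + 1 else wb.2)
        else wb) wb) wb
    = (wb.1 + i * ((r2.count i : Int) * (r3.count i : Int)),
       if i = 4 then wb.2 + (r2.count i : Int) * (r3.count i : Int) else wb.2) := by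
  induction r2 with
  | nil => intro wb; simp
  | cons j r2 ih =>
    intro wb
    rw [List.foldl_cons, ih, pv_inner]
    by_cases hij : i = j
    · subst hij
      rw [if_pos rfl, List.count_cons_self]
      by_cases h4 : i = 4 <;> simp [h4, Prod.ext_iff] <;> (try constructor) <;> ring
    · rw [if_neg hij, List.count_cons_of_ne (Ne.symm hij)]

-- Phase 2, outer loop of A: a sum over column one and the count of 4s.
theorem pv_outer (m : Int → Int) (l1 : List Int) : ∀ (wb : Int × Int),
    l1.foldl (fun wb v => (wb.1 + v * m v, if v = 4 then wb.2 + m v else wb.2)) wb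
    = (wb.1 + (l1.map (fun v => v * m v)).sum, wb.2 + (l1.count 4 : Int) * m 4) := by
  induction l1 with
  | nil => intro wb; simp
  | cons v l1 ih =>
    intro wb
    rw [List.foldl_cons, ih]
    by_cases h4 : v = 4
    · subst h4
      rw [List.count_cons_self]
      simp [Prod.ext_iff]; constructor <;> ring
    · rw [if_neg h4, List.count_cons_of_ne h4]
      simp [Prod.ext_iff]; ring

-- Summing f over a list equals summing count·f over its distinct elements.
theorem pv_sum_dedup (f : Int → Int) (l : List Int) :
    ((PySem.Set.ofList l).map (fun k => (l.count k : Int) * f k)).sum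
      = (l.map f).sum := by
  induction l using List.reverseRecOn with
  | nil => simp [PySem.Set.ofList_nil]
  | append_singleton l x ih =>
    rw [PySem.Set.ofList_append_singleton]
    by_cases hx : x ∈ l
    · rw [PySem.Set.add_of_mem (by simpa [PySem.Set.mem_ofList] using hx)]
      have hnd := PySem.Set.nodup_ofList (xs := l)
      -- split the single occurrence of x in ofList l
      obtain ⟨s1, s2, hsplit⟩ := List.append_of_mem
        ((PySem.Set.mem_ofList (xs := l) (y := x)).2 hx)
      rw [hsplit, List.nodup_middle, List.nodup_cons] at hnd
      have hxs1 : x ∉ s1 := fun h => hnd.1 (List.mem_append.2 (Or.inl h))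
      have hxs2 : x ∉ s2 := fun h => hnd.1 (List.mem_append.2 (Or.inr h))
      rw [hsplit] at ih ⊢
      simp only [List.map_append, List.map_cons, List.sum_append, List.sum_cons] at ih ⊢
      have e1 : s1.map (fun k => ((l ++ [x]).count k : Int) * f k)
          = s1.map (fun k => (l.count k : Int) * f k) := by
        refine List.map_congr_left fun k hk => ?_
        have hne : x ≠ k := fun h => hxs1 (h ▸ hk)
        simp [List.count_append, hne]
      have e2 : s2.map (fun k => ((l ++ [x]).count k : Int) * f k)
          = s2.map (fun k => (l.count k : Int) * f k) := by
        refine List.map_congr_left fun k hk => ?_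
        have hne : x ≠ k := fun h => hxs2 (h ▸ hk)
        simp [List.count_append, hne]
      have ex : ((l ++ [x]).count x : Int) * f x = (l.count x : Int) * f x + f x := by
        simp [List.count_append]; ring
      rw [e1, e2, ex]
      simp only [List.map_nil, List.sum_nil]
      linarith [ih]
    · rw [PySem.Set.add_of_not_mem (by simpa [PySem.Set.mem_ofList] using hx)]
      simp only [List.map_append, List.sum_append, List.map_cons, List.map_nil,
        List.sum_cons, List.sum_nil]
      have e1 : (PySem.Set.ofList l).map (fun k => ((l ++ [x]).count k : Int) * f k)
          = (PySem.Set.ofList l).map (fun k => (l.count k : Int) * f k) := by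
        refine List.map_congr_left fun k hk => ?_
        have hne : x ≠ k := fun h =>
          hx (h ▸ ((PySem.Set.mem_ofList (xs := l) (y := k)).1 hk))
        simp [List.count_append, hne]
      have ex : ((l ++ [x]).count x : Int) = 1 := by
        simp [List.count_append, List.count_eq_zero_of_not_mem hx]
      rw [e1, ih, ex]
      ring

-- ===== VERDICT (by name: the statement is the Claim_ definition above) =====
theorem is_spin_win_spec : Claim_equal_is_spin_win := by
  intro reel_giant cols _ _
  unfold Spec_is_spin_win is_spin_win is_spin_win_alt pvTally
  dsimp only
  rw [pv_split]
  set cells := PySem.List.enumerate reel_giant 0 with hc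
  set L1 := (cells.filter (fun p => PySem.Int.mod p.1 cols == 0)).map (·.2) with h1
  set L2 := (cells.filter (fun p => PySem.Int.mod p.1 cols == 1)).map (·.2) with h2
  set L3 := (cells.filter (fun p =>
    PySem.Int.mod p.1 cols != 0 && PySem.Int.mod p.1 cols != 1)).map (·.2) with h3
  simp only [List.nil_append]
  rw [PySem.Dict.foldl_insert_getD_add_one_eq_counter,
      PySem.Dict.foldl_insert_getD_add_one_eq_counter,
      PySem.Dict.foldl_insert_getD_add_one_eq_counter]
  -- A's nested loops collapse to per-element products
  have hA : L1.foldl (fun wb i =>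
      L2.foldl (fun wb j =>
        L3.foldl (fun wb k =>
          if i = j ∧ j = k then (wb.1 + i, if i = 4 then wb.2 + 1 else wb.2)
          else wb) wb) wb) ((0 : Int), (0 : Int))
      = L1.foldl (fun wb v =>
          (wb.1 + v * ((L2.count v : Int) * (L3.count v : Int)),
           if v = 4 then wb.2 + (L2.count v : Int) * (L3.count v : Int) else wb.2))
          (0, 0) := by
    refine PySem.List.foldl_congr_mem _ _ _ _ ?_
    intro wb v _
    rw [pv_mid]
  rw [hA, pv_outer (fun v => (L2.count v : Int) * (L3.count v : Int))]
  -- B's side: items of the counter, getD of counters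
  rw [PySem.Dict.items_counter]
  rw [PySem.List.foldl_add (g := fun (p : Int × Int) =>
        p.1 * p.2 * (PySem.Dict.counter L2).getD p.1 0 * (PySem.Dict.counter L3).getD p.1 0)]
  simp only [List.map_map, PySem.Dict.getD_counter, Function.comp_def]
  have : ((PySem.Set.ofList L1).map
      (fun k => k * (L1.count k : Int) * (L2.count k : Int) * (L3.count k : Int))).sum
      = ((PySem.Set.ofList L1).map
      (fun k => (L1.count k : Int) * (k * ((L2.count k : Int) * (L3.count k : Int))))).sum := by
    congr 1
    exact List.map_congr_left fun k _ => by ring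
  rw [this, pv_sum_dedup (fun k => k * ((L2.count k : Int) * (L3.count k : Int)))]
  exact Prod.ext (by simp) (by simp; ring)
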